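-- pv_equiv track=rewrite | github.com/JeffersonLab/rfw_tsf_extractor | python/process.py | count_mismatched_labels
-- ===== SOURCE A (Python) =====
-- def count_mismatched_labels(events):
--     n_labels = 0
--     for event in events:
--         lines = events[event]
--         all_match = True
--         if len(lines) > 1:
--             for i in range(len(lines)):
--                 if lines[0] != lines[i]:
--                     all_match = False
--                     break
--         if not all_match:
--             n_labels += len(lines)
--
--     return n_labels
-- ===== SOURCE B (Python) =====
-- def count_mismatched_labels(events):
--     values = list(events.values())
--     total = sum(len(v) for v in values)
--     matched = sum(len(v) for v in values if not v or v.count(v[0]) == len(v))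
--     return total - matched
-- ===== Notes on version B (the rewrite author's own statement) =====
-- stated objective: alternative
-- what changed: B computes the result by complement in two staged passes: first the total number of lines across all events, then the lines of 'uniform' events (tested with lines.count(lines[0]) == len(lines) instead of a compare-to-first flag loop with break), and returns total minus uniform; A accumulates mismatched lengths directly in one guarded pass.
import Mathlib
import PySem

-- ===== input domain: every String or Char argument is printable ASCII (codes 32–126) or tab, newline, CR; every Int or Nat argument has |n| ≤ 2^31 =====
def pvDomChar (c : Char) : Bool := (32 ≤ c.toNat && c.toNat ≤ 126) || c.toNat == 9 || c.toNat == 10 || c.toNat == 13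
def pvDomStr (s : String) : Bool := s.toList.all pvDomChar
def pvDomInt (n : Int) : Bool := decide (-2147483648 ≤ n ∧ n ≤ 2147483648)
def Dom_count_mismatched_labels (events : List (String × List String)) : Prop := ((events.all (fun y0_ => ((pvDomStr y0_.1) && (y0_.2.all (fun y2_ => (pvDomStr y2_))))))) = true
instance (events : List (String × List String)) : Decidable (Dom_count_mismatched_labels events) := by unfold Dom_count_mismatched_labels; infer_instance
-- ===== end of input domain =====

-- B computes the answer by complement: total lines minus lines of uniform events (uniformity
-- tested via lines.count(lines[0]) == len(lines)), in two staged passes instead of A's single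
-- guarded accumulation with a compare-to-first break loop (alternative decomposition, same cost).

-- ===== PORT A =====
-- 'for i in range(len(lines)): if lines[0] != lines[i]: all_match = False; break'
-- (walks lines from the front, compares each element to the first, stops at the first mismatch)
def pvAllMatchLoop (first : String) : List String → Bool
  | [] => true
  | x :: xs => if first ≠ x then false else pvAllMatchLoop first xs

def count_mismatched_labels (events : List (String × List String)) : Int :=
  events.foldl (fun n_labels ev =>
    let lines := (PySem.Dict.mk events).getD ev.1 []   -- events[event]; the key is present, so no KeyError
    let all_match := if 1 < lines.length then pvAllMatchLoop (lines.headD "") lines else true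
    -- lines.headD "" is lines[0]; it is only consulted under the guard 1 < lines.length, where the head exists
    if !all_match then n_labels + (lines.length : Int) else n_labels) 0

-- ===== PORT B =====
-- 'not v or v.count(v[0]) == len(v)': v.headD "" is v[0], consulted only when v is nonempty
def pvUniform (v : List String) : Bool :=
  v.isEmpty || (PySem.List.count v (v.headD "") == v.length)

def count_mismatched_labels_alt (events : List (String × List String)) : Int :=
  let values := (PySem.Dict.mk events).values
  let total := ((values.map (fun v => (v.length : Int))).sum)
  let matched := (((values.filter pvUniform).map (fun v => (v.length : Int))).sum)
  total - matched

-- ===== PRECONDITION & SPEC =====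
-- Pre_ admits exactly the association lists that represent a Python dict (A's parameter is a dict):
-- distinct keys; a duplicate-key list corresponds to no dict input of A.
def Pre_count_mismatched_labels (events : List (String × List String)) : Prop :=
  (events.map Prod.fst).Nodup
instance (events : List (String × List String)) : Decidable (Pre_count_mismatched_labels events) := by unfold Pre_count_mismatched_labels; infer_instance

def pvWitness_count_mismatched_labels : (List (String × List String)) :=
  [("a", ["x", "y"]), ("b", ["x"])]

def Spec_count_mismatched_labels (events : List (String × List String)) (out : Int) : Prop := out = count_mismatched_labels_alt events
instance (events : List (String × List String)) (out : Int) : Decidable (Spec_count_mismatched_labels events out) := by unfold Spec_count_mismatched_labels; infer_instance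

-- ===== CLAIM (what is proved, stated in full; the proofs are below) =====
def Claim_equal_count_mismatched_labels : Prop := ∀ (events : List (String × List String)), Dom_count_mismatched_labels events → Pre_count_mismatched_labels events → Spec_count_mismatched_labels events (count_mismatched_labels events)

-- ===== LEMMAS AND PROOFS =====

-- the break loop returns false iff some element differs from `first`
lemma pvAllMatchLoop_eq_false_iff (first : String) (l : List String) :
    pvAllMatchLoop first l = false ↔ ∃ x ∈ l, x ≠ first := by
  induction l with
  | nil => simp [pvAllMatchLoop]
  | cons x xs ih =>
    by_cases h : first = x
    · subst h
      simp [pvAllMatchLoop, ih]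
    · simp [pvAllMatchLoop, h]
      exact Or.inl (Ne.symm h)

-- A's per-event mismatch test equals the negation of B's uniformity test
lemma cond_eq (v : List String) :
    (!(if 1 < v.length then pvAllMatchLoop (v.headD "") v else true)) = !(pvUniform v) := by
  match v with
  | [] => simp [pvUniform]
  | [a] => simp [pvUniform, PySem.List.count]
  | a :: b :: xs =>
    have hlen : 1 < (a :: b :: xs).length := by simp only [List.length_cons]; omega
    rw [if_pos hlen, List.headD_cons, Bool.eq_iff_iff]
    simp only [pvUniform, List.isEmpty_cons, Bool.false_or,
      Bool.not_eq_eq_eq_not, Bool.not_true, beq_eq_false_iff_ne, ne_eq,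
      PySem.List.count_eq]
    rw [pvAllMatchLoop_eq_false_iff]
    constructor
    · rintro ⟨x, hx, hxa⟩ hcnt
      exact hxa ((List.count_eq_length.mp hcnt x hx).symm)
    · intro hcnt
      by_contra hno
      push Not at hno
      exact hcnt (List.count_eq_length.mpr (fun y hy => (hno y hy).symm))

-- splitting a sum by a predicate: the failing part is the total minus the passing part
lemma sum_split {α : Type} (l : List α) (p : α → Bool) (g : α → Int) :
    ((l.filter (fun x => !p x)).map g).sum = (l.map g).sum - ((l.filter p).map g).sum := by
  induction l with
  | nil => simp
  | cons x xs ih =>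
    by_cases h : p x = true
    · simp [h, ih]
    · simp only [Bool.not_eq_true] at h
      simp [h, ih]
      ring

-- ===== VERDICT (by name: the statement is the Claim_ definition above) =====
theorem count_mismatched_labels_spec : Claim_equal_count_mismatched_labels := by
  intro events _ hpre
  unfold Spec_count_mismatched_labels count_mismatched_labels count_mismatched_labels_alt
  -- step 1: under Nodup keys, the lookup events[event] yields the pair's own value
  have h1 := PySem.List.foldl_congr_mem (l := events) (init := (0 : Int))
    (g := fun n_labels (ev : String × List String) =>
      if !(pvUniform ev.2) then n_labels + (ev.2.length : Int) else n_labels)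
    (f := fun n_labels ev =>
      let lines := (PySem.Dict.mk events).getD ev.1 []
      let all_match := if 1 < lines.length then pvAllMatchLoop (lines.headD "") lines else true
      if !all_match then n_labels + (lines.length : Int) else n_labels)
    (by
      intro acc ev hev
      have hk : (PySem.Dict.mk events).keys.Nodup := hpre
      have hitems : (ev.1, ev.2) ∈ (PySem.Dict.mk events).items := by
        simpa [PySem.Dict.items] using hev
      have hget : (PySem.Dict.mk events).getD ev.1 [] = ev.2 :=
        PySem.Dict.getD_of_mem_items _ hitems hk []
      simp only [hget, cond_eq])
  rw [h1]
  -- step 2: A's guarded accumulation is the sum over the events failing the uniformity test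
  rw [PySem.List.foldl_if_eq_foldl_filter, PySem.List.foldl_add]
  -- step 3: B's total-minus-matched equals that filtered sum
  rw [sum_split (p := fun ev : String × List String => pvUniform ev.2)
        (g := fun ev : String × List String => (ev.2.length : Int))]
  simp [PySem.Dict.values, List.filter_map, Function.comp_def]
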